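-- pv_equiv track=rewrite | github.com/infotaskosphere/Final-Taskosphere-3 | backend/email_integration.py | _sender_matches_whitelist
-- ===== SOURCE A (Python) =====
-- from typing import Optional, List, Dict, Any, Set, Tuple
--
-- def _normalize_whitelist_entry(entry: str) -> str:
--     return entry.strip().lower()
--
-- def _sender_matches_whitelist(sender_email: str, whitelist: List[str]) -> bool:
--     sender_lower = sender_email.strip().lower()
--     for entry in whitelist:
--         entry = _normalize_whitelist_entry(entry)
--         if not entry:
--             continue
--         if entry.startswith("@"):
--             domain_part = entry[1:]
--             if sender_lower.endswith("@" + domain_part) or sender_lower.endswith("." + domain_part):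
--                 return True
--         else:
--             if sender_lower == entry:
--                 return True
--     return False
-- ===== SOURCE B (Python) =====
-- def _sender_matches_whitelist(sender_email, whitelist):
--     # Index the SENDER instead of scanning with endswith: collect every suffix
--     # of the normalized sender that follows an '@' or '.' character.  An entry
--     # "@dom" matches exactly when "dom" is one of those suffixes, so each
--     # domain entry becomes a single set-membership test.
--     s = sender_email.strip().lower()
--     suffixes = {s[i + 1:] for i in range(len(s)) if s[i] in "@."}
--     for entry in whitelist:
--         e = entry.strip().lower()
--         if e.startswith("@"):
--             if e[1:] in suffixes:
--                 return True
--         elif e and e == s: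
--             return True
--     return False
-- ===== Notes on version B (the rewrite author's own statement) =====
-- stated objective: alternative
-- what changed: Instead of testing endswith('@'+d)/endswith('.'+d) per whitelist entry, B precomputes the set of suffixes of the normalized sender that follow an '@' or '.' character, so each domain entry is decided by one set-membership test; correct because '@'+d is a suffix of s exactly when d follows an '@' in s (likewise for '.').
import Mathlib
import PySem

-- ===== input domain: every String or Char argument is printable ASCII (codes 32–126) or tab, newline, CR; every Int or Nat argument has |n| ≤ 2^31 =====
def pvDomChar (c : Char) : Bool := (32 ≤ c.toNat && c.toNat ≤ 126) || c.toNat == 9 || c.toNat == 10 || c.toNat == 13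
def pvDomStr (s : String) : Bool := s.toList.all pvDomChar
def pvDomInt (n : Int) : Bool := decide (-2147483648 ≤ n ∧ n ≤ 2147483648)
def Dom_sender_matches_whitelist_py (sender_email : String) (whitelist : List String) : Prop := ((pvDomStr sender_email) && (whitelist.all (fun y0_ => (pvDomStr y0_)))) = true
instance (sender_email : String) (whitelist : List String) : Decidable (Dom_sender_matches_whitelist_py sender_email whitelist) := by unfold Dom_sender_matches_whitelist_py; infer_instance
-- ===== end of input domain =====

-- B replaces per-entry endswith tests by a precomputed set of the sender's '@'/'.'-suffixes; same return value, no speed claim.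

-- ===== PORT A =====
-- entry.strip().lower()  (helper _normalize_whitelist_entry)
def pvNormalizeEntry (entry : String) : List Char :=
  PySem.Chars.lower (PySem.Chars.strip entry.toList)

-- A's for-loop with early return, sender_lower fixed
def pvALoop (sender_lower : List Char) : List String → Bool
  | [] => false
  | e :: rest =>
    let entry := pvNormalizeEntry e
    if entry = [] then pvALoop sender_lower rest
    else if PySem.Chars.startswith entry ['@'] then
      let domain_part := PySem.List.slice entry (some 1) none
      if PySem.Chars.endswith sender_lower ('@' :: domain_part)
         || PySem.Chars.endswith sender_lower ('.' :: domain_part) then true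
      else pvALoop sender_lower rest
    else if sender_lower = entry then true
    else pvALoop sender_lower rest

def sender_matches_whitelist_py (sender_email : String) (whitelist : List String) : Bool :=
  pvALoop (PySem.Chars.lower (PySem.Chars.strip sender_email.toList)) whitelist

-- ===== PORT B =====
-- Source B: suffixes = {s[i+1:] for i in range(len(s)) if s[i] in "@."}
def pvSuffixSet (s : List Char) : PySem.Set (List Char) :=
  PySem.Set.ofList
    (((List.range s.length).filter (fun (i : Nat) =>
        PySem.List.pyGet? s ((i : Nat) : Int) == some '@'
          || PySem.List.pyGet? s ((i : Nat) : Int) == some '.')).map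
      (fun (i : Nat) => PySem.List.slice s (some (((i : Nat) : Int) + 1)) none))

-- Source B's for-loop over the whitelist, checking against the suffix set
def pvBLoop (s : List Char) (suf : PySem.Set (List Char)) : List String → Bool
  | [] => false
  | e :: rest =>
    let el := PySem.Chars.lower (PySem.Chars.strip e.toList)
    if PySem.Chars.startswith el ['@'] then
      if PySem.Set.contains suf (PySem.List.slice el (some 1) none) then true
      else pvBLoop s suf rest
    else if el ≠ [] ∧ el = s then true
    else pvBLoop s suf rest

def sender_matches_whitelist_py_alt (sender_email : String) (whitelist : List String) : Bool :=
  let s := PySem.Chars.lower (PySem.Chars.strip sender_email.toList)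
  pvBLoop s (pvSuffixSet s) whitelist

-- ===== PRECONDITION & SPEC =====
def Spec_sender_matches_whitelist_py (sender_email : String) (whitelist : List String) (out : Bool) : Prop := out = sender_matches_whitelist_py_alt sender_email whitelist
instance (sender_email : String) (whitelist : List String) (out : Bool) : Decidable (Spec_sender_matches_whitelist_py sender_email whitelist out) := by unfold Spec_sender_matches_whitelist_py; infer_instance

-- ===== CLAIM (what is proved, stated in full; the proofs are below) =====
def Claim_equal_sender_matches_whitelist_py : Prop := ∀ (sender_email : String) (whitelist : List String), Dom_sender_matches_whitelist_py sender_email whitelist → Spec_sender_matches_whitelist_py sender_email whitelist (sender_matches_whitelist_py sender_email whitelist)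

-- ===== LEMMAS AND PROOFS =====

-- c :: d is a suffix of s iff d follows an occurrence of c in s
theorem pv_cons_suffix_iff (c : Char) (d s : List Char) :
    (c :: d <:+ s) ↔ ∃ i, i < s.length ∧ s[i]? = some c ∧ s.drop (i + 1) = d := by
  constructor
  · rintro ⟨t, ht⟩
    refine ⟨t.length, ?_, ?_, ?_⟩
    · subst ht; simp
    · subst ht; simp
    · have : t ++ c :: d = (t ++ [c]) ++ d := by simp
      rw [← ht, this]
      have hl : (t ++ [c]).length = t.length + 1 := by simp
      rw [← hl, List.drop_left]
  · rintro ⟨i, hi, hc, hd⟩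
    refine ⟨s.take i, ?_⟩
    have := List.drop_eq_getElem_cons hi
    have hg : s[i] = c := by
      have := List.getElem?_eq_getElem hi
      rw [this] at hc; exact Option.some.inj hc
    calc s.take i ++ c :: d = s.take i ++ s.drop i := by
          rw [this, hg, hd]
      _ = s := List.take_append_drop i s

-- membership in the suffix set decides both endswith tests at once
theorem pv_suffix_contains (s d : List Char) :
    PySem.Set.contains (pvSuffixSet s) d
      = (PySem.Chars.endswith s ('@' :: d) || PySem.Chars.endswith s ('.' :: d)) := by
  rw [Bool.eq_iff_iff]
  simp only [Bool.or_eq_true, PySem.Chars.endswith_iff, pv_cons_suffix_iff, pvSuffixSet]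
  simp only [PySem.Set.contains, PySem.Set.mem_ofList, List.elem_eq_mem, decide_eq_true_eq,
    List.mem_map, List.mem_filter, List.mem_range, Bool.or_eq_true, beq_iff_eq]
  constructor
  · rintro ⟨i, ⟨hi, hc⟩, hd⟩
    rw [PySem.List.pyGet?_natCast s i] at hc
    have hsl : PySem.List.slice s (some ((i : Int) + 1)) none = s.drop (i + 1) := by
      have : ((i : Int) + 1) = ((i + 1 : Nat) : Int) := by push_cast; ring
      rw [this, PySem.List.slice_from_natCast]
    rw [hsl] at hd
    rcases hc with hc | hc
    · exact Or.inl ⟨i, hi, hc, hd⟩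
    · exact Or.inr ⟨i, hi, hc, hd⟩
  · rintro (⟨i, hi, hc, hd⟩ | ⟨i, hi, hc, hd⟩) <;>
      refine ⟨i, ⟨hi, by rw [PySem.List.pyGet?_natCast s i]; simp [hc]⟩, ?_⟩ <;>
      · have : ((i : Int) + 1) = ((i + 1 : Nat) : Int) := by push_cast; ring
        rw [this, PySem.List.slice_from_natCast, hd]

-- the two loops agree entry by entry
theorem pv_loops_eq (s : List Char) (ws : List String) :
    pvBLoop s (pvSuffixSet s) ws = pvALoop s ws := by
  induction ws with
  | nil => rfl
  | cons e rest ih =>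
    simp only [pvBLoop, pvALoop, pvNormalizeEntry]
    by_cases h0 : PySem.Chars.lower (PySem.Chars.strip e.toList) = []
    · have hs0 : PySem.Chars.startswith ([] : List Char) ['@'] = false := by decide
      simp [h0, hs0, ih]
    · by_cases h1 : PySem.Chars.startswith (PySem.Chars.lower (PySem.Chars.strip e.toList)) ['@'] = true
      · simp only [h1, pv_suffix_contains]
        split <;> simp_all
      · have h1' : PySem.Chars.startswith (PySem.Chars.lower (PySem.Chars.strip e.toList)) ['@'] = false := by
          simpa using h1
        simp only [if_neg h0, h1', Bool.false_eq_true, if_false]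
        by_cases h2 : PySem.Chars.lower (PySem.Chars.strip e.toList) = s
        · rw [if_pos (show ¬PySem.Chars.lower (PySem.Chars.strip e.toList) = [] ∧
              PySem.Chars.lower (PySem.Chars.strip e.toList) = s from ⟨h0, h2⟩),
            if_pos h2.symm]
        · have h2' : s ≠ PySem.Chars.lower (PySem.Chars.strip e.toList) := fun h => h2 h.symm
          simp [h0, h2, h2', ih]

-- ===== VERDICT (by name: the statement is the Claim_ definition above) =====
theorem sender_matches_whitelist_py_spec : Claim_equal_sender_matches_whitelist_py := by
  intro sender_email whitelist _
  unfold Spec_sender_matches_whitelist_py sender_matches_whitelist_py sender_matches_whitelist_py_alt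
  exact (pv_loops_eq _ _).symm
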